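-- pv_equiv track=rewrite | github.com/CarlosSandoval-03/Ej_Python | Ej60a70.py | crear_matriz_binaria
-- ===== SOURCE A (Python) =====
-- def verificar_matriz(producto_cartesiano:list, relacion:list) -> bool:
--     for i in range(len(relacion)):
--         if producto_cartesiano == relacion[i]:
--             return True
--     return False
--
-- def crear_matriz_binaria(arreglo1:list, arreglo2:list, relacion:list) -> list:
--     n,m = len(arreglo1), len(arreglo2)
--     matriz = [[0 for j in range(m)] for i in range(n)]
--
--     for i in range(n):
--         for j in range(m):
--             if verificar_matriz([arreglo1[i], arreglo2[j]], relacion):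
--                 matriz[i][j] = 1
--     return matriz
-- ===== SOURCE B (Python) =====
-- def crear_matriz_binaria(arreglo1: list, arreglo2: list, relacion: list) -> list:
--     n, m = len(arreglo1), len(arreglo2)
--     idx1 = {}
--     for i, a in enumerate(arreglo1):
--         idx1[a] = idx1.get(a, []) + [i]
--     idx2 = {}
--     for j, b in enumerate(arreglo2):
--         idx2[b] = idx2.get(b, []) + [j]
--     matriz = [[0] * m for _ in range(n)]
--     for par in relacion:
--         if len(par) == 2:
--             for i in idx1.get(par[0], []):
--                 for j in idx2.get(par[1], []):
--                     matriz[i][j] = 1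
--     return matriz
-- ===== Notes on version B (the rewrite author's own statement) =====
-- stated objective: faster
-- what changed: Instead of scanning the whole relation for every (i,j) cell (nested loops with a linear verificar_matriz scan), B builds value->indices dictionaries for both arrays once and makes a single pass over the relation, setting matriz[i][j]=1 for the cartesian product of the index lists of each length-2 pair.
import Mathlib
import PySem

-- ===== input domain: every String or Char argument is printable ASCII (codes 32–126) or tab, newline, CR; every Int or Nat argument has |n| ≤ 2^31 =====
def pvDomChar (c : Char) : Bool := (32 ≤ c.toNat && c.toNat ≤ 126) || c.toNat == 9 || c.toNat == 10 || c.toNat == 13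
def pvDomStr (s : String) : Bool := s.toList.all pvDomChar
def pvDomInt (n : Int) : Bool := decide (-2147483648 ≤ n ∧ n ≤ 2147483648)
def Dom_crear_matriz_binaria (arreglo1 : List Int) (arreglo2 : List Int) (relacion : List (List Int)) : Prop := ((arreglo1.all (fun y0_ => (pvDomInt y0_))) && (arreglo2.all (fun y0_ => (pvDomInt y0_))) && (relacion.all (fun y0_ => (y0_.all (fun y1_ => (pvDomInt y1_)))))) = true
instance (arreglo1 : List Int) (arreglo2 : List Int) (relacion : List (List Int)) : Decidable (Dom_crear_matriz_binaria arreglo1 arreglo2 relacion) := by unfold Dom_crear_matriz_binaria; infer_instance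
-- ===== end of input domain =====

-- B replaces A's cell-by-cell scan of the relation (O(n*m*|rel|)) by one pass over the
-- relation driven through precomputed value→indices dictionaries; return values are equal.

-- ===== PORT A =====
-- the early-return 'for i in range(len(relacion))' loop of verificar_matriz
def pvVerificarGo (pc : List Int) (rel : List (List Int)) : List Nat → Bool
  | [] => false
  | i :: is => if pc == rel.getD i [] then true else pvVerificarGo pc rel is

def verificar_matriz (producto_cartesiano : List Int) (relacion : List (List Int)) : Bool :=
  pvVerificarGo producto_cartesiano relacion (List.range relacion.length)

-- 'matriz[i][j] = 1'
def pvSetOne (M : List (List Int)) (i j : Nat) : List (List Int) :=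
  M.modify i (fun row => row.set j 1)

def crear_matriz_binaria (arreglo1 : List Int) (arreglo2 : List Int) (relacion : List (List Int)) : List (List Int) :=
  let n := arreglo1.length
  let m := arreglo2.length
  let matriz := (List.range n).map (fun _ => (List.range m).map (fun _ => (0 : Int)))
  (List.range n).foldl (fun M i =>
    (List.range m).foldl (fun M j =>
      if verificar_matriz [arreglo1.getD i 0, arreglo2.getD j 0] relacion
      then pvSetOne M i j else M) M) matriz

-- ===== PORT B =====
-- 'for i, a in enumerate(xs): d[a] = d.get(a, []) + [i]'
def pvIndexDict (xs : List Int) : PySem.Dict Int (List Int) :=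
  (PySem.List.enumerate xs 0).foldl
    (fun d p => d.insert p.2 (d.getD p.2 [] ++ [p.1])) PySem.Dict.empty

def crear_matriz_binaria_alt (arreglo1 : List Int) (arreglo2 : List Int) (relacion : List (List Int)) : List (List Int) :=
  let n := arreglo1.length
  let m := arreglo2.length
  let idx1 := pvIndexDict arreglo1
  let idx2 := pvIndexDict arreglo2
  let matriz := (List.range n).map (fun _ => List.replicate m (0 : Int))
  relacion.foldl (fun M par =>
    if par.length == 2 then
      (idx1.getD (par.getD 0 0) []).foldl (fun M i =>
        (idx2.getD (par.getD 1 0) []).foldl (fun M j =>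
          pvSetOne M i.toNat j.toNat) M) M
    else M) matriz

-- ===== PRECONDITION & SPEC =====
def Spec_crear_matriz_binaria (arreglo1 : List Int) (arreglo2 : List Int) (relacion : List (List Int)) (out : List (List Int)) : Prop := out = crear_matriz_binaria_alt arreglo1 arreglo2 relacion
instance (arreglo1 : List Int) (arreglo2 : List Int) (relacion : List (List Int)) (out : List (List Int)) : Decidable (Spec_crear_matriz_binaria arreglo1 arreglo2 relacion out) := by unfold Spec_crear_matriz_binaria; infer_instance

-- ===== CLAIM (what is proved, stated in full; the proofs are below) =====
def Claim_equal_crear_matriz_binaria : Prop := ∀ (arreglo1 : List Int) (arreglo2 : List Int) (relacion : List (List Int)), Dom_crear_matriz_binaria arreglo1 arreglo2 relacion → Spec_crear_matriz_binaria arreglo1 arreglo2 relacion (crear_matriz_binaria arreglo1 arreglo2 relacion)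

-- ===== LEMMAS AND PROOFS =====

set_option maxHeartbeats 1000000

-- the (i,j) cell of a matrix, with defaults out of range
def pvGet2 (M : List (List Int)) (i j : Nat) : Int := ((M[i]?.getD [])[j]?).getD 0

-- row length, with default out of range
def pvLen2 (M : List (List Int)) (i : Nat) : Nat := (M[i]?.getD []).length

-- merge two nested guarded writes of the same value into one
theorem pvIfOr {A B C : Prop} [Decidable A] [Decidable B] [Decidable C]
    (h : C ↔ A ∨ B) (v : Int) :
    (if A then (1 : Int) else if B then 1 else v) = if C then 1 else v := by
  by_cases hA : A <;> by_cases hB : B <;> simp [hA, hB, h]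

theorem pvLen2_setOne (M : List (List Int)) (i j k : Nat) :
    pvLen2 (pvSetOne M i j) k = pvLen2 M k := by
  simp only [pvLen2, pvSetOne, List.getElem?_modify]
  cases h : M[k]? with
  | none => simp
  | some row => by_cases hik : i = k <;> simp [hik]

theorem pvLength_setOne (M : List (List Int)) (i j : Nat) :
    (pvSetOne M i j).length = M.length := by
  simp [pvSetOne]

theorem pvGet2_setOne (M : List (List Int)) (i j i' j' : Nat)
    (hi : i < M.length) (hj : j < pvLen2 M i) :
    pvGet2 (pvSetOne M i j) i' j' =
      if i = i' ∧ j = j' then 1 else pvGet2 M i' j' := by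
  simp only [pvGet2, pvSetOne, List.getElem?_modify]
  cases h : M[i']? with
  | none =>
    have hne : ¬ i = i' := by
      rintro rfl
      rw [List.getElem?_eq_none_iff] at h
      omega
    simp [hne]
  | some row =>
    by_cases hii : i = i'
    · subst hii
      have hjlen : j < row.length := by
        rw [pvLen2, h] at hj
        simpa using hj
      by_cases hjj : j = j'
      · subst hjj
        simp [hjlen]
      · simp [hjj]
    · simp [hii]

-- shape: n rows, each of length m
def pvShape (M : List (List Int)) (n m : Nat) : Prop :=
  M.length = n ∧ ∀ k, k < n → pvLen2 M k = m

theorem pvShape_setOne (M : List (List Int)) (n m i j : Nat) (h : pvShape M n m) :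
    pvShape (pvSetOne M i j) n m := by
  obtain ⟨h1, h2⟩ := h
  exact ⟨by rw [pvLength_setOne, h1], fun k hk => by rw [pvLen2_setOne]; exact h2 k hk⟩

theorem pvShape_zero (n m : Nat) :
    pvShape ((List.range n).map (fun _ => List.replicate m (0 : Int))) n m := by
  refine ⟨by simp, fun k hk => ?_⟩
  simp [pvLen2, hk]

theorem pvGet2_zero (n m i j : Nat) :
    pvGet2 ((List.range n).map (fun _ => List.replicate m (0 : Int))) i j = 0 := by
  by_cases hi : i < n <;> by_cases hj : j < m <;>
    simp [pvGet2, List.map_const', hi, hj]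

theorem pvRangeMap_eq_replicate (m : Nat) :
    (List.range m).map (fun _ => (0 : Int)) = List.replicate m (0 : Int) := by
  simp [List.map_const']

-- A-side: verificar_matriz is list membership
theorem pvVerificarGo_spec (pc : List Int) (rel : List (List Int)) (is : List Nat) :
    pvVerificarGo pc rel is = true ↔ ∃ i ∈ is, rel.getD i [] = pc := by
  induction is with
  | nil => simp [pvVerificarGo]
  | cons i is ih =>
    simp only [pvVerificarGo]
    by_cases hc : pc == rel.getD i []
    · have hEq : rel.getD i [] = pc := (beq_iff_eq.1 hc).symm
      rw [if_pos hc]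
      constructor
      · intro _; exact ⟨i, by simp, hEq⟩
      · intro _; trivial
    · rw [if_neg hc, ih]
      constructor
      · rintro ⟨k, hk, hkEq⟩; exact ⟨k, List.mem_cons_of_mem _ hk, hkEq⟩
      · rintro ⟨k, hk, hkEq⟩
        rcases List.mem_cons.1 hk with rfl | hk'
        · exact absurd (beq_iff_eq.2 hkEq.symm) hc
        · exact ⟨k, hk', hkEq⟩

theorem verificar_spec (pc : List Int) (rel : List (List Int)) :
    verificar_matriz pc rel = true ↔ pc ∈ rel := by
  rw [verificar_matriz, pvVerificarGo_spec]
  constructor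
  · rintro ⟨i, hi, hEq⟩
    rw [List.mem_range] at hi
    rw [List.getD_eq_getElem?_getD, List.getElem?_eq_getElem hi] at hEq
    exact hEq ▸ List.getElem_mem hi
  · intro hm
    obtain ⟨i, hi, hEq⟩ := List.mem_iff_getElem.1 hm
    exact ⟨i, List.mem_range.2 hi,
      by rw [List.getD_eq_getElem?_getD, List.getElem?_eq_getElem hi]; simpa using hEq⟩

-- A-side inner loop characterization
theorem pvInnerA (c : Nat → Bool) (n m i : Nat) (hi : i < n) :
    ∀ (js : List Nat) (M : List (List Int)), pvShape M n m → (∀ j ∈ js, j < m) →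
      pvShape (js.foldl (fun M j => if c j then pvSetOne M i j else M) M) n m ∧
      ∀ i' j', pvGet2 (js.foldl (fun M j => if c j then pvSetOne M i j else M) M) i' j' =
        if i = i' ∧ j' ∈ js ∧ c j' then 1 else pvGet2 M i' j' := by
  intro js
  induction js with
  | nil => intro M hM _; exact ⟨hM, fun i' j' => by simp⟩
  | cons j js ih =>
    intro M hM hjs
    have hj : j < m := hjs j (by simp)
    have hShape' : pvShape (if c j then pvSetOne M i j else M) n m := by
      by_cases hc : c j
      · simpa [hc] using pvShape_setOne M n m i j hM
      · simpa [hc] using hM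
    obtain ⟨hS, hG⟩ := ih (if c j then pvSetOne M i j else M) hShape'
      (fun x hx => hjs x (List.mem_cons_of_mem _ hx))
    refine ⟨by simpa using hS, ?_⟩
    intro i' j'
    simp only [List.foldl_cons]
    rw [hG i' j']
    by_cases hc : c j
    · have hstep : pvGet2 (if c j = true then pvSetOne M i j else M) i' j' =
          if i = i' ∧ j = j' then 1 else pvGet2 M i' j' := by
        rw [if_pos hc]
        exact pvGet2_setOne M i j i' j' (by rw [hM.1]; exact hi) (by rw [hM.2 i hi]; exact hj)
      rw [hstep]
      refine pvIfOr ?_ _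
      constructor
      · rintro ⟨h1, hmem, h4⟩
        rcases List.mem_cons.1 hmem with h2 | h2
        · exact Or.inr ⟨h1, h2.symm⟩
        · exact Or.inl ⟨h1, h2, h4⟩
      · rintro (⟨h1, h2, h4⟩ | ⟨h1, h2⟩)
        · exact ⟨h1, List.mem_cons_of_mem _ h2, h4⟩
        · exact ⟨h1, h2 ▸ List.mem_cons_self, h2 ▸ hc⟩
    · rw [if_neg hc]
      have hiff : (i = i' ∧ j' ∈ js ∧ c j' = true) ↔ (i = i' ∧ j' ∈ j :: js ∧ c j' = true) := by
        constructor
        · rintro ⟨h1, h2, h4⟩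
          exact ⟨h1, List.mem_cons_of_mem _ h2, h4⟩
        · rintro ⟨h1, hmem, h4⟩
          rcases List.mem_cons.1 hmem with h2 | h2
          · exact absurd (h2 ▸ h4) hc
          · exact ⟨h1, h2, h4⟩
      exact if_congr hiff rfl rfl

-- A-side outer loop characterization
theorem pvOuterA (c : Nat → Nat → Bool) (n m : Nat) :
    ∀ (is : List Nat) (M : List (List Int)), pvShape M n m → (∀ i ∈ is, i < n) →
      pvShape (is.foldl (fun M i => (List.range m).foldl
          (fun M j => if c i j then pvSetOne M i j else M) M) M) n m ∧
      ∀ i' j', pvGet2 (is.foldl (fun M i => (List.range m).foldl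
          (fun M j => if c i j then pvSetOne M i j else M) M) M) i' j' =
        if i' ∈ is ∧ j' < m ∧ c i' j' then 1 else pvGet2 M i' j' := by
  intro is
  induction is with
  | nil => intro M hM _; exact ⟨hM, fun i' j' => by simp⟩
  | cons i is ih =>
    intro M hM his
    have hi : i < n := his i (by simp)
    obtain ⟨hS1, hG1⟩ := pvInnerA (c i) n m i hi (List.range m) M hM
      (fun j hj => List.mem_range.1 hj)
    obtain ⟨hS, hG⟩ := ih _ hS1 (fun x hx => his x (List.mem_cons_of_mem _ hx))
    refine ⟨by simpa using hS, ?_⟩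
    intro i' j'
    simp only [List.foldl_cons]
    rw [hG i' j', hG1 i' j']
    refine pvIfOr ?_ _
    constructor
    · rintro ⟨hmem, h3, h4⟩
      rcases List.mem_cons.1 hmem with h2 | h2
      · exact Or.inr ⟨h2.symm, List.mem_range.2 h3, h2 ▸ h4⟩
      · exact Or.inl ⟨h2, h3, h4⟩
    · rintro (⟨h2, h3, h4⟩ | ⟨h1, h3, h4⟩)
      · exact ⟨List.mem_cons_of_mem _ h2, h3, h4⟩
      · exact ⟨h1 ▸ List.mem_cons_self, List.mem_range.1 h3, h1 ▸ h4⟩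

-- B-side: index dictionary membership
theorem pvIdxFold_mem (ps : List (Int × Int)) (d : PySem.Dict Int (List Int)) (a x : Int) :
    x ∈ ((ps.foldl (fun d p => d.insert p.2 (d.getD p.2 [] ++ [p.1])) d).getD a []) ↔
      x ∈ d.getD a [] ∨ (x, a) ∈ ps := by
  induction ps generalizing d with
  | nil => simp
  | cons p ps ih =>
    rw [List.foldl_cons, ih, PySem.Dict.getD_insert]
    by_cases ha : a = p.2
    · simp [ha, Prod.ext_iff]
      tauto
    · simp [ha, Prod.ext_iff]

theorem pvIndexDict_mem (xs : List Int) (a x : Int) :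
    x ∈ (pvIndexDict xs).getD a [] ↔ ∃ k : Nat, x = (k : Int) ∧ xs[k]? = some a := by
  rw [pvIndexDict, pvIdxFold_mem]
  have hempty : (PySem.Dict.empty : PySem.Dict Int (List Int)).getD a [] = [] := by
    simp [PySem.Dict.empty, PySem.Dict.getD, PySem.Dict.get?]
  rw [hempty]
  simp only [List.not_mem_nil, false_or]
  rw [PySem.List.mem_enumerate_iff]
  constructor
  · rintro ⟨k, hk, hEq⟩
    refine ⟨k, ?_, ?_⟩
    · simpa using congrArg Prod.fst hEq
    · rw [List.getElem?_eq_getElem hk]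
      simpa using (congrArg Prod.snd hEq).symm
  · rintro ⟨k, rfl, hk⟩
    have hklen : k < xs.length := (List.getElem?_eq_some_iff.1 hk).1
    refine ⟨k, hklen, ?_⟩
    rw [List.getElem?_eq_getElem hklen] at hk
    simp at hk
    simp [hk]

-- B-side: row fold (unconditional setOne over an Int index list)
theorem pvRowB (n m : Nat) (i : Int) (ki : Nat) (hki : i = (ki : Int)) (hi : ki < n) :
    ∀ (js : List Int), (∀ y ∈ js, ∃ k : Nat, y = (k : Int) ∧ k < m) →
    ∀ (M : List (List Int)), pvShape M n m →
      pvShape (js.foldl (fun M j => pvSetOne M i.toNat j.toNat) M) n m ∧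
      ∀ i' j', pvGet2 (js.foldl (fun M j => pvSetOne M i.toNat j.toNat) M) i' j' =
        if ki = i' ∧ (j' : Int) ∈ js then 1 else pvGet2 M i' j' := by
  intro js
  induction js with
  | nil => intro _ M hM; exact ⟨hM, fun i' j' => by simp⟩
  | cons j js ih =>
    intro hjs M hM
    obtain ⟨kj, rfl, hkj⟩ := hjs j (by simp)
    have hset : pvShape (pvSetOne M i.toNat ((kj : Int)).toNat) n m :=
      pvShape_setOne M n m _ _ hM
    obtain ⟨hS, hG⟩ := ih (fun y hy => hjs y (List.mem_cons_of_mem _ hy)) _ hset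
    refine ⟨by simpa using hS, ?_⟩
    intro i' j'
    simp only [List.foldl_cons]
    rw [hG i' j']
    have hstep : pvGet2 (pvSetOne M i.toNat ((kj : Int)).toNat) i' j' =
        if ki = i' ∧ kj = j' then 1 else pvGet2 M i' j' := by
      have h1 : i.toNat = ki := by rw [hki]; simp
      have h2 : ((kj : Int)).toNat = kj := by simp
      rw [h1, h2]
      exact pvGet2_setOne M ki kj i' j' (by rw [hM.1]; exact hi) (by rw [hM.2 ki hi]; exact hkj)
    rw [hstep]
    refine pvIfOr ?_ _
    constructor
    · rintro ⟨h1, hmem⟩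
      rcases List.mem_cons.1 hmem with h2 | h2
      · exact Or.inr ⟨h1, by exact_mod_cast h2.symm⟩
      · exact Or.inl ⟨h1, h2⟩
    · rintro (⟨h1, h2⟩ | ⟨h1, h2⟩)
      · exact ⟨h1, List.mem_cons_of_mem _ h2⟩
      · refine ⟨h1, ?_⟩
        have : ((j' : Nat) : Int) = ((kj : Nat) : Int) := by exact_mod_cast h2.symm
        exact this ▸ List.mem_cons_self

-- B-side: product fold over two Int index lists
theorem pvInnerB (n m : Nat) (js : List Int)
    (hjs : ∀ y ∈ js, ∃ k : Nat, y = (k : Int) ∧ k < m) :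
    ∀ (is : List Int), (∀ x ∈ is, ∃ k : Nat, x = (k : Int) ∧ k < n) →
    ∀ (M : List (List Int)), pvShape M n m →
      pvShape (is.foldl (fun M i => js.foldl (fun M j => pvSetOne M i.toNat j.toNat) M) M) n m ∧
      ∀ i' j', pvGet2 (is.foldl (fun M i => js.foldl (fun M j => pvSetOne M i.toNat j.toNat) M) M) i' j' =
        if (i' : Int) ∈ is ∧ (j' : Int) ∈ js then 1 else pvGet2 M i' j' := by
  intro is
  induction is with
  | nil => intro _ M hM; exact ⟨hM, fun i' j' => by simp⟩
  | cons i is ih =>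
    intro his M hM
    obtain ⟨ki, hki, hkin⟩ := his i (by simp)
    obtain ⟨hS1, hG1⟩ := pvRowB n m i ki hki hkin js hjs M hM
    obtain ⟨hS, hG⟩ := ih (fun x hx => his x (List.mem_cons_of_mem _ hx)) _ hS1
    refine ⟨by simpa using hS, ?_⟩
    intro i' j'
    simp only [List.foldl_cons]
    rw [hG i' j', hG1 i' j']
    refine pvIfOr ?_ _
    constructor
    · rintro ⟨hmem, hj⟩
      rcases List.mem_cons.1 hmem with h2 | h2
      · refine Or.inr ⟨?_, hj⟩
        rw [hki] at h2
        exact_mod_cast h2.symm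
      · exact Or.inl ⟨h2, hj⟩
    · rintro (⟨h2, hj⟩ | ⟨h1, hj⟩)
      · exact ⟨List.mem_cons_of_mem _ h2, hj⟩
      · refine ⟨?_, hj⟩
        have : ((i' : Nat) : Int) = i := by rw [hki]; exact_mod_cast h1.symm
        exact this ▸ List.mem_cons_self

-- B-side: outer fold over the relation
theorem pvOuterB (a1 a2 : List Int) :
    ∀ (rel : List (List Int)) (M : List (List Int)), pvShape M a1.length a2.length →
      pvShape (rel.foldl (fun M par =>
        if par.length == 2 then
          ((pvIndexDict a1).getD (par.getD 0 0) []).foldl (fun M i =>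
            ((pvIndexDict a2).getD (par.getD 1 0) []).foldl (fun M j =>
              pvSetOne M i.toNat j.toNat) M) M
        else M) M) a1.length a2.length ∧
      ∀ i' j', pvGet2 (rel.foldl (fun M par =>
        if par.length == 2 then
          ((pvIndexDict a1).getD (par.getD 0 0) []).foldl (fun M i =>
            ((pvIndexDict a2).getD (par.getD 1 0) []).foldl (fun M j =>
              pvSetOne M i.toNat j.toNat) M) M
        else M) M) i' j' =
        if (∃ par ∈ rel, par.length = 2 ∧ (i' : Int) ∈ (pvIndexDict a1).getD (par.getD 0 0) [] ∧
            (j' : Int) ∈ (pvIndexDict a2).getD (par.getD 1 0) []) then 1 else pvGet2 M i' j' := by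
  intro rel
  induction rel with
  | nil => intro M hM; exact ⟨hM, fun i' j' => by simp⟩
  | cons par rel ih =>
    intro M hM
    by_cases hp : par.length = 2
    · have hb : (par.length == 2) = true := by simpa using hp
      have his : ∀ x ∈ (pvIndexDict a1).getD (par.getD 0 0) [],
          ∃ k : Nat, x = (k : Int) ∧ k < a1.length := by
        intro x hx
        obtain ⟨k, rfl, hk⟩ := (pvIndexDict_mem a1 _ x).1 hx
        exact ⟨k, rfl, (List.getElem?_eq_some_iff.1 hk).1⟩
      have hjs : ∀ y ∈ (pvIndexDict a2).getD (par.getD 1 0) [],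
          ∃ k : Nat, y = (k : Int) ∧ k < a2.length := by
        intro y hy
        obtain ⟨k, rfl, hk⟩ := (pvIndexDict_mem a2 _ y).1 hy
        exact ⟨k, rfl, (List.getElem?_eq_some_iff.1 hk).1⟩
      obtain ⟨hS1, hG1⟩ := pvInnerB a1.length a2.length _ hjs _ his M hM
      obtain ⟨hS, hG⟩ := ih _ hS1
      constructor
      · simpa only [List.foldl_cons, hb, if_true] using hS
      · intro i' j'
        simp only [List.foldl_cons, hb, if_true]
        rw [hG i' j', hG1 i' j']
        refine pvIfOr ?_ _
        constructor
        · rintro ⟨q, hmemq, hq2, hqi, hqj⟩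
          rcases List.mem_cons.1 hmemq with rfl | hmemq'
          · exact Or.inr ⟨hqi, hqj⟩
          · exact Or.inl ⟨q, hmemq', hq2, hqi, hqj⟩
        · rintro (⟨q, hmemq, hq2, hqi, hqj⟩ | ⟨hqi, hqj⟩)
          · exact ⟨q, List.mem_cons_of_mem _ hmemq, hq2, hqi, hqj⟩
          · exact ⟨par, List.mem_cons_self, hp, hqi, hqj⟩
    · have hb : (par.length == 2) = false := by simpa using hp
      obtain ⟨hS, hG⟩ := ih M hM
      constructor
      · simpa only [List.foldl_cons, hb, Bool.false_eq_true, if_false] using hS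
      · intro i' j'
        simp only [List.foldl_cons, hb, Bool.false_eq_true, if_false]
        rw [hG i' j']
        have hiff : (∃ q ∈ rel, q.length = 2 ∧
              (i' : Int) ∈ (pvIndexDict a1).getD (q.getD 0 0) [] ∧
              (j' : Int) ∈ (pvIndexDict a2).getD (q.getD 1 0) []) ↔
            (∃ q ∈ par :: rel, q.length = 2 ∧
              (i' : Int) ∈ (pvIndexDict a1).getD (q.getD 0 0) [] ∧
              (j' : Int) ∈ (pvIndexDict a2).getD (q.getD 1 0) []) := by
          constructor
          · rintro ⟨q, hmemq, hq2, hqi, hqj⟩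
            exact ⟨q, List.mem_cons_of_mem _ hmemq, hq2, hqi, hqj⟩
          · rintro ⟨q, hmemq, hq2, hqi, hqj⟩
            rcases List.mem_cons.1 hmemq with rfl | hmemq'
            · exact absurd hq2 hp
            · exact ⟨q, hmemq', hq2, hqi, hqj⟩
        exact if_congr hiff rfl rfl

-- a length-2 list is determined by its first two getD's
theorem pvPair_eq (par : List Int) (x y : Int) (h : par.length = 2) :
    par = [x, y] ↔ par.getD 0 0 = x ∧ par.getD 1 0 = y := by
  match par, h with
  | [a, b], _ => simp [List.getD]

-- the two cell conditions agree
theorem pvCond_iff (a1 a2 : List Int) (rel : List (List Int)) (i j : Nat) :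
    (i ∈ List.range a1.length ∧ j < a2.length ∧
      verificar_matriz [a1.getD i 0, a2.getD j 0] rel = true) ↔
    (∃ par ∈ rel, par.length = 2 ∧ (i : Int) ∈ (pvIndexDict a1).getD (par.getD 0 0) [] ∧
      (j : Int) ∈ (pvIndexDict a2).getD (par.getD 1 0) []) := by
  constructor
  · rintro ⟨hi, hj, hv⟩
    rw [List.mem_range] at hi
    rw [verificar_spec] at hv
    refine ⟨[a1.getD i 0, a2.getD j 0], hv, by simp, ?_, ?_⟩
    · rw [pvIndexDict_mem]
      refine ⟨i, rfl, ?_⟩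
      show a1[i]? = some (a1.getD i 0)
      rw [List.getElem?_eq_getElem hi, List.getD_eq_getElem?_getD, List.getElem?_eq_getElem hi]
      rfl
    · rw [pvIndexDict_mem]
      refine ⟨j, rfl, ?_⟩
      show a2[j]? = some (a2.getD j 0)
      rw [List.getElem?_eq_getElem hj, List.getD_eq_getElem?_getD, List.getElem?_eq_getElem hj]
      rfl
  · rintro ⟨par, hmem, hlen, h1, h2⟩
    rw [pvIndexDict_mem] at h1 h2
    obtain ⟨k1, hk1, hg1⟩ := h1
    obtain ⟨k2, hk2, hg2⟩ := h2
    have hik : i = k1 := by exact_mod_cast hk1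
    have hjk : j = k2 := by exact_mod_cast hk2
    subst hik
    subst hjk
    have hi : i < a1.length := (List.getElem?_eq_some_iff.1 hg1).1
    have hj : j < a2.length := (List.getElem?_eq_some_iff.1 hg2).1
    refine ⟨List.mem_range.2 hi, hj, ?_⟩
    rw [verificar_spec]
    have hpar : par = [a1.getD i 0, a2.getD j 0] := by
      rw [pvPair_eq par _ _ hlen]
      constructor
      · have hx : a1.getD i 0 = (a1[i]?).getD 0 := List.getD_eq_getElem?_getD
        rw [hx, hg1]
        rfl
      · have hx : a2.getD j 0 = (a2[j]?).getD 0 := List.getD_eq_getElem?_getD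
        rw [hx, hg2]
        rfl
    exact hpar ▸ hmem

theorem pvEq_of_shape_get2 (M N : List (List Int)) (n m : Nat)
    (hM : pvShape M n m) (hN : pvShape N n m)
    (h : ∀ i j, pvGet2 M i j = pvGet2 N i j) : M = N := by
  have hlen : M.length = N.length := by rw [hM.1, hN.1]
  apply List.ext_getElem hlen
  intro i h1 h2
  have hiM : i < n := hM.1 ▸ h1
  have hrowM : M[i].length = m := by
    have hx := hM.2 i hiM
    rw [pvLen2, List.getElem?_eq_getElem h1] at hx
    simpa using hx
  have hrowN : N[i].length = m := by
    have hx := hN.2 i hiM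
    rw [pvLen2, List.getElem?_eq_getElem h2] at hx
    simpa using hx
  apply List.ext_getElem (by rw [hrowM, hrowN])
  intro j hj1 hj2
  have hh := h i j
  rw [pvGet2, pvGet2, List.getElem?_eq_getElem h1, List.getElem?_eq_getElem h2] at hh
  simp only [Option.getD_some] at hh
  rw [List.getElem?_eq_getElem hj1, List.getElem?_eq_getElem hj2] at hh
  simpa using hh

-- ===== VERDICT (by name: the statement is the Claim_ definition above) =====
theorem crear_matriz_binaria_spec : Claim_equal_crear_matriz_binaria := by
  intro a1 a2 rel _
  show crear_matriz_binaria a1 a2 rel = crear_matriz_binaria_alt a1 a2 rel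
  rw [crear_matriz_binaria, crear_matriz_binaria_alt]
  simp only [pvRangeMap_eq_replicate]
  obtain ⟨hSA, hGA⟩ := pvOuterA
    (fun i j => verificar_matriz [a1.getD i 0, a2.getD j 0] rel)
    a1.length a2.length (List.range a1.length)
    ((List.range a1.length).map (fun _ => List.replicate a2.length (0 : Int)))
    (pvShape_zero _ _) (fun i hi => List.mem_range.1 hi)
  obtain ⟨hSB, hGB⟩ := pvOuterB a1 a2 rel
    ((List.range a1.length).map (fun _ => List.replicate a2.length (0 : Int)))
    (pvShape_zero _ _)
  refine pvEq_of_shape_get2 _ _ a1.length a2.length hSA hSB ?_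
  intro i j
  rw [hGA i j, hGB i j, pvGet2_zero]
  by_cases hc : i ∈ List.range a1.length ∧ j < a2.length ∧
      verificar_matriz [a1.getD i 0, a2.getD j 0] rel = true
  · rw [if_pos ⟨hc.1, hc.2.1, hc.2.2⟩, if_pos ((pvCond_iff a1 a2 rel i j).1 hc)]
  · rw [if_neg (fun h => hc ((pvCond_iff a1 a2 rel i j).2 h)),
      if_neg (fun h => hc ⟨h.1, h.2.1, h.2.2⟩)]
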